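-- pv_equiv track=rewrite | github.com/eliottcassidy2000/math | 04-computation/q009_n7_fast.py | count_vd_pairs
-- ===== SOURCE A (Python) =====
-- def count_vd_pairs(cycles):
--     count = 0
--     for a in range(len(cycles)):
--         for b in range(a + 1, len(cycles)):
--             if len(cycles[a]) == 3 and len(cycles[b]) == 3:
--                 if not (set(cycles[a]) & set(cycles[b])):
--                     count += 1
--     return count
-- ===== SOURCE B (Python) =====
-- def count_vd_pairs(cycles):
--     # One left-to-right pass: keep multiplicities of the distinct vertex-sets of
--     # the length-3 cycles seen so far; for each new triple add the multiplicities
--     # of the already-seen sets disjoint from it.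
--     seen = {}  # canonical sorted tuple of the vertex set -> multiplicity
--     count = 0
--     for c in cycles:
--         if len(c) == 3:
--             s = set(c)
--             for k, m in seen.items():
--                 if s.isdisjoint(k):
--                     count += m
--             key = tuple(sorted(s))
--             seen[key] = seen.get(key, 0) + 1
--     return count
-- ===== Notes on version B (the rewrite author's own statement) =====
-- stated objective: faster
-- what changed: Instead of scanning all index pairs and rebuilding both vertex sets for every pair, B makes one pass keeping a dict of multiplicities of the distinct vertex sets of triples seen so far, and counts each new triple against the distinct sets only.
import Mathlib
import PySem

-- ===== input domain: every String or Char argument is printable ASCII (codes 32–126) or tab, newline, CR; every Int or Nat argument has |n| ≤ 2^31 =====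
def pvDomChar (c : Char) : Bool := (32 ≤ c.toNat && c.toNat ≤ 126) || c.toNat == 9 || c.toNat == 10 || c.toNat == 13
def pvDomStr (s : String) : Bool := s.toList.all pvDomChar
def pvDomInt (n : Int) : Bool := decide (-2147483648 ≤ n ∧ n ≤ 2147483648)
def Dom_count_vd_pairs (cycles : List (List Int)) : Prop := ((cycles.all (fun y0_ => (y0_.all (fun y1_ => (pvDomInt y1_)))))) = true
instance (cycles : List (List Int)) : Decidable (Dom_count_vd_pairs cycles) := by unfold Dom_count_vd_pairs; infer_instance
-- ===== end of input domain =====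

-- B replaces A's all-index-pairs scan (which rebuilds both vertex sets for every pair) by one
-- left-to-right pass over a multiplicity table of the distinct vertex sets seen so far.

-- ===== PORT A =====
-- both indices produced by range(...) are always in range, so pyGetD's default [] is never taken
def count_vd_pairs (cycles : List (List Int)) : Int :=
  (PySem.List.pyRange 0 cycles.length 1).foldl (fun count a =>
    (PySem.List.pyRange (a + 1) cycles.length 1).foldl (fun count b =>
      if (PySem.List.pyGetD cycles a []).length = 3 ∧ (PySem.List.pyGetD cycles b []).length = 3 then
        if PySem.Set.inter (PySem.Set.ofList (PySem.List.pyGetD cycles a []))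
            (PySem.Set.ofList (PySem.List.pyGetD cycles b [])) = [] then count + 1
        else count
      else count) count) 0

-- ===== PORT B =====
def count_vd_pairs_alt (cycles : List (List Int)) : Int :=
  (cycles.foldl (fun (st : PySem.Dict (List Int) Int × Int) c =>
      if c.length = 3 then
        let s : PySem.Set Int := PySem.Set.ofList c
        let count := st.1.items.foldl (fun cnt km =>
          if PySem.Set.isdisjoint s km.1 then cnt + km.2 else cnt) st.2
        let key := PySem.List.sorted s (fun x => x) false
        (st.1.insert key (st.1.getD key 0 + 1), count)
      else st)
    (PySem.Dict.empty, 0)).2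

-- ===== PRECONDITION & SPEC =====
def Spec_count_vd_pairs (cycles : List (List Int)) (out : Int) : Prop := out = count_vd_pairs_alt cycles
instance (cycles : List (List Int)) (out : Int) : Decidable (Spec_count_vd_pairs cycles out) := by unfold Spec_count_vd_pairs; infer_instance

-- ===== CLAIM (what is proved, stated in full; the proofs are below) =====
def Claim_equal_count_vd_pairs : Prop := ∀ (cycles : List (List Int)), Dom_count_vd_pairs cycles → Spec_count_vd_pairs cycles (count_vd_pairs cycles)

-- ===== LEMMAS AND PROOFS =====

-- A's pair test as a predicate
abbrev pvPairA (x y : List Int) : Prop :=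
  (x.length = 3 ∧ y.length = 3) ∧
    PySem.Set.inter (PySem.Set.ofList x) (PySem.Set.ofList y) = ([] : List Int)

-- the canonical key B stores for a triple
def pvKey3 (c : List Int) : List Int :=
  PySem.List.sorted (PySem.Set.ofList c : PySem.Set Int) (fun x => x) false

-- B's step function (definitionally the lambda of count_vd_pairs_alt)
def pvBStep (st : PySem.Dict (List Int) Int × Int) (c : List Int) :
    PySem.Dict (List Int) Int × Int :=
  if c.length = 3 then
    let s : PySem.Set Int := PySem.Set.ofList c
    let count := st.1.items.foldl (fun cnt km =>
      if PySem.Set.isdisjoint s km.1 then cnt + km.2 else cnt) st.2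
    let key := PySem.List.sorted s (fun x => x) false
    (st.1.insert key (st.1.getD key 0 + 1), count)
  else st

lemma pvAlt_eq_foldl (cycles : List (List Int)) :
    count_vd_pairs_alt cycles = (cycles.foldl pvBStep (PySem.Dict.empty, 0)).2 := rfl

-- the keys of the triples of xs, in order
def pvKeys3 (xs : List (List Int)) : List (List Int) :=
  (xs.filter (fun c => decide (c.length = 3))).map pvKey3

-- structural pair count (pairs counted at their left element)
def pvPC : List (List Int) → Int
  | [] => 0
  | c :: rest => (rest.countP (fun d => decide (pvPairA c d)) : Int) + pvPC rest

-- ---- A-side: the index loops compute pvPC ----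

lemma pvRange_map_getD {α : Type} (xs : List α) (d : α) (i : Nat) :
    (PySem.List.pyRange (i : Int) (xs.length : Int) 1).map (fun j => PySem.List.pyGetD xs j d)
      = xs.drop i := by
  by_cases h : i < xs.length
  · rw [PySem.List.pyRange_one_cons (by exact_mod_cast h)]
    have hcast : (i : Int) + 1 = ((i + 1 : Nat) : Int) := by push_cast; ring
    rw [List.map_cons, hcast, pvRange_map_getD xs d (i + 1)]
    rw [PySem.List.pyGetD_eq_getElem xs d (by positivity) (by exact_mod_cast h)]
    rw [List.drop_eq_getElem_cons h]
    simp
  · have h1 : ¬ ((i : Int) < (xs.length : Int)) := by exact_mod_cast h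
    have h2 : PySem.List.pyRange (i : Int) (xs.length : Int) 1 = [] := by
      simp [PySem.List.pyRange, h1]
    rw [h2, List.drop_eq_nil_of_le (by omega)]
    rfl
termination_by xs.length - i

lemma pvInnerA (cycles : List (List Int)) (a count : Int) :
    (PySem.List.pyRange (a + 1) (cycles.length : Int) 1).foldl (fun count b =>
      if (PySem.List.pyGetD cycles a []).length = 3 ∧ (PySem.List.pyGetD cycles b []).length = 3 then
        if PySem.Set.inter (PySem.Set.ofList (PySem.List.pyGetD cycles a []))
            (PySem.Set.ofList (PySem.List.pyGetD cycles b [])) = [] then count + 1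
        else count
      else count) count
    = count + ((PySem.List.pyRange (a + 1) (cycles.length : Int) 1).countP
        (fun b => decide (pvPairA (PySem.List.pyGetD cycles a []) (PySem.List.pyGetD cycles b []))) : Int) := by
  rw [PySem.List.foldl_congr_mem _ _
    (fun count b => if pvPairA (PySem.List.pyGetD cycles a []) (PySem.List.pyGetD cycles b [])
      then count + 1 else count) _
    (by intro acc b _; by_cases h1 : (PySem.List.pyGetD cycles a []).length = 3 ∧ (PySem.List.pyGetD cycles b []).length = 3
        · by_cases h2 : PySem.Set.inter (PySem.Set.ofList (PySem.List.pyGetD cycles a []))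
              (PySem.Set.ofList (PySem.List.pyGetD cycles b [])) = ([] : List Int)
          · simp [pvPairA, h1, h2]
          · simp [pvPairA, h1, h2]
        · simp [pvPairA, h1])]
  exact PySem.List.foldl_ite_add_one _ _ _

lemma pvA_eq_sum (cycles : List (List Int)) :
    count_vd_pairs cycles
      = ((List.range cycles.length).map (fun i =>
          ((cycles.drop (i + 1)).countP
            (fun d => decide (pvPairA (PySem.List.pyGetD cycles (i : Int) []) d)) : Int))).sum := by
  unfold count_vd_pairs
  rw [PySem.List.foldl_congr_mem _ _
    (fun count a => count + ((PySem.List.pyRange (a + 1) (cycles.length : Int) 1).countP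
        (fun b => decide (pvPairA (PySem.List.pyGetD cycles a []) (PySem.List.pyGetD cycles b []))) : Int)) _
    (by intro acc a _; exact pvInnerA cycles a acc)]
  rw [PySem.List.foldl_add]
  rw [PySem.List.pyRange_zero_natCast cycles.length, List.map_map]
  rw [zero_add]
  apply congrArg
  apply List.map_congr_left
  intro i _
  simp only [Function.comp]
  have hcast : (i : Int) + 1 = ((i + 1 : Nat) : Int) := by push_cast; ring
  rw [hcast, ← pvRange_map_getD cycles [] (i + 1), List.countP_map]
  rfl

lemma pvSum_eq_pc (cycles : List (List Int)) :
    ((List.range cycles.length).map (fun i =>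
        ((cycles.drop (i + 1)).countP
          (fun d => decide (pvPairA (PySem.List.pyGetD cycles (i : Int) []) d)) : Int))).sum
      = pvPC cycles := by
  induction cycles with
  | nil => simp [pvPC]
  | cons c rest ih =>
    rw [List.length_cons, List.range_succ_eq_map, List.map_cons, List.sum_cons, List.map_map]
    have hhead : PySem.List.pyGetD (c :: rest) ((0 : Nat) : Int) [] = c := by
      rw [PySem.List.pyGetD_eq_getElem _ _ (by norm_num) (by simp)]
      rfl
    have htail : ((List.range rest.length).map
        ((fun i => ((( c :: rest).drop (i + 1)).countP
            (fun d => decide (pvPairA (PySem.List.pyGetD (c :: rest) (i : Int) []) d)) : Int)) ∘ Nat.succ)).sum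
        = ((List.range rest.length).map (fun i =>
            ((rest.drop (i + 1)).countP
              (fun d => decide (pvPairA (PySem.List.pyGetD rest (i : Int) []) d)) : Int))).sum := by
      apply congrArg
      apply List.map_congr_left
      intro i hi
      have hi' : i < rest.length := List.mem_range.mp hi
      simp only [Function.comp]
      have h1 : PySem.List.pyGetD (c :: rest) ((Nat.succ i : Nat) : Int) [] =
          PySem.List.pyGetD rest (i : Int) [] := by
        rw [PySem.List.pyGetD_eq_getElem _ _ (by positivity) (by simp; omega),
            PySem.List.pyGetD_eq_getElem _ _ (by positivity) (by exact_mod_cast hi')]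
        simp [Nat.succ_eq_add_one]
      rw [h1]
      have h2 : (c :: rest).drop (Nat.succ i + 1) = rest.drop (i + 1) := List.drop_succ_cons
      rw [h2]
    rw [htail, ih, hhead]
    simp [pvPC]

lemma pvA_eq_pc (cycles : List (List Int)) : count_vd_pairs cycles = pvPC cycles := by
  rw [pvA_eq_sum, pvSum_eq_pc]

-- ---- pvPC grows at the right end ----

lemma pvPC_append (xs : List (List Int)) (c : List Int) :
    pvPC (xs ++ [c]) = pvPC xs + (xs.countP (fun d => decide (pvPairA d c)) : Int) := by
  induction xs with
  | nil => simp [pvPC]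
  | cons x xs' ih =>
    simp only [List.cons_append, pvPC, List.countP_append, List.countP_cons,
      List.countP_nil, ih]
    push_cast
    ring

-- ---- B-side: the dict is a counter of pvKeys3 ----

lemma pvDict_inv (xs : List (List Int)) :
    (xs.foldl pvBStep (PySem.Dict.empty, 0)).1 = PySem.Dict.counter (pvKeys3 xs) := by
  induction xs using List.reverseRecOn with
  | nil => rfl
  | append_singleton xs c ih =>
    rw [List.foldl_append, List.foldl_cons, List.foldl_nil]
    by_cases h : c.length = 3
    · have hk : pvKeys3 (xs ++ [c]) = pvKeys3 xs ++ [pvKey3 c] := by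
        simp [pvKeys3, List.filter_append, h, pvKey3]
      rw [hk, PySem.Dict.counter_eq_foldl, List.foldl_append, ← PySem.Dict.counter_eq_foldl]
      simp only [pvBStep, h, if_pos]
      rw [ih]
      rfl
    · have hk : pvKeys3 (xs ++ [c]) = pvKeys3 xs := by
        simp [pvKeys3, List.filter_append, h]
      rw [hk, ← ih]
      simp [pvBStep, h]

-- sum an items loop
lemma pvItems_sum (l : List (List Int × Int)) (p : List Int → Bool) (t : Int) :
    l.foldl (fun cnt km => if p km.1 then cnt + km.2 else cnt) t
      = t + (l.map (fun km => if p km.1 then km.2 else 0)).sum := by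
  rw [PySem.List.foldl_congr_mem _ _ (fun cnt km => cnt + (if p km.1 then km.2 else 0)) _
    (by intro acc km _; by_cases h : p km.1 <;> simp [h])]
  exact PySem.List.foldl_add _ _ _

lemma pvSum_map_ite {α : Type} (l : List α) (p : α → Bool) (f : α → Int) :
    (l.map (fun k => if p k then f k else 0)).sum = ((l.filter p).map f).sum := by
  induction l with
  | nil => rfl
  | cons x l ih => by_cases h : p x <;> simp [h, ih]

lemma pvCountP_sum (ks : List (List Int)) (p : List Int → Bool) :
    ((PySem.Set.ofList ks).map (fun k => if p k then (ks.count k : Int) else 0)).sum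
      = (ks.countP p : Int) := by
  rw [pvSum_map_ite]
  have hperm : (PySem.Set.ofList ks).Perm ks.dedup :=
    (List.perm_ext_iff_of_nodup (PySem.Set.nodup_ofList ks) ks.nodup_dedup).2
      (by intro a; rw [PySem.Set.mem_ofList, List.mem_dedup])
  rw [((hperm.filter p).map (fun k => (ks.count k : Int))).sum_eq]
  rw [← List.sum_map_count_dedup_filter_eq_countP p ks, Nat.cast_list_sum, List.map_map]
  apply congrArg
  apply List.map_congr_left
  intro k _
  simp only [Function.comp_def]
  norm_cast
  simp only [List.count_eq_countP]
  apply List.countP_congr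
  intro x _
  simp only [beq_iff_eq]

lemma pvB_snoc (xs : List (List Int)) (c : List Int) :
    ((xs ++ [c]).foldl pvBStep (PySem.Dict.empty, 0)).2
      = (xs.foldl pvBStep (PySem.Dict.empty, 0)).2
        + (if c.length = 3 then
            ((pvKeys3 xs).countP
              (fun k => PySem.Set.isdisjoint (PySem.Set.ofList c) k) : Int)
          else 0) := by
  rw [List.foldl_append, List.foldl_cons, List.foldl_nil]
  by_cases h : c.length = 3
  · simp only [pvBStep, h, if_pos]
    rw [pvItems_sum]
    rw [pvDict_inv xs, PySem.Dict.items_counter (pvKeys3 xs), List.map_map]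
    have : ((fun km : List Int × Int => if PySem.Set.isdisjoint (PySem.Set.ofList c) km.1 then km.2 else 0)
        ∘ (fun k => (k, ((pvKeys3 xs).count k : Int))))
        = fun k => if PySem.Set.isdisjoint (PySem.Set.ofList c) k then ((pvKeys3 xs).count k : Int) else 0 := rfl
    rw [this, pvCountP_sum]
  · simp [pvBStep, h]

-- ---- the two pair tests agree ----

lemma pvDisj_iff (c d : List Int) :
    PySem.Set.inter (PySem.Set.ofList d) (PySem.Set.ofList c) = ([] : List Int)
      ↔ PySem.Set.isdisjoint (PySem.Set.ofList c) (pvKey3 d) = true := by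
  have hkey : ∀ x : Int, x ∈ pvKey3 d ↔ x ∈ PySem.Set.ofList d := fun x =>
    (PySem.List.sorted_perm (PySem.Set.ofList d) (fun x => x) false).mem_iff
  simp only [PySem.Set.inter, PySem.Set.isdisjoint, PySem.Set.contains,
    List.filter_eq_nil_iff, Bool.not_eq_eq_eq_not, Bool.not_true, List.any_eq_false,
    List.contains_iff_mem, hkey, PySem.Set.mem_ofList]
  constructor <;> (intro h x h1 h2; exact h _ h2 h1)

lemma pvPred_eq (c d : List Int) (hc : c.length = 3) :
    decide (pvPairA d c)
      = (decide (d.length = 3) && PySem.Set.isdisjoint (PySem.Set.ofList c) (pvKey3 d)) := by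
  by_cases hd : d.length = 3
  · by_cases hdisj : PySem.Set.inter (PySem.Set.ofList d) (PySem.Set.ofList c) = ([] : List Int)
    · simp [pvPairA, hc, hd, hdisj, (pvDisj_iff c d).1 hdisj]
    · have : ¬ PySem.Set.isdisjoint (PySem.Set.ofList c) (pvKey3 d) = true := fun h =>
        hdisj ((pvDisj_iff c d).2 h)
      simp [pvPairA, hc, hd, hdisj, this]
  · simp [pvPairA, hd]

-- ---- final bridge ----

lemma pvPC_eq_B (xs : List (List Int)) :
    pvPC xs = (xs.foldl pvBStep (PySem.Dict.empty, 0)).2 := by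
  induction xs using List.reverseRecOn with
  | nil => rfl
  | append_singleton xs c ih =>
    rw [pvPC_append, pvB_snoc, ih]
    apply congrArg
    by_cases h : c.length = 3
    · rw [if_pos h]
      have : (pvKeys3 xs).countP (fun k => PySem.Set.isdisjoint (PySem.Set.ofList c) k)
          = xs.countP (fun d => decide (pvPairA d c)) := by
        unfold pvKeys3
        rw [List.countP_map, List.countP_filter]
        apply List.countP_congr
        intro d _
        simp only [Function.comp]
        rw [pvPred_eq c d h, Bool.and_comm]
      rw [this]
    · rw [if_neg h]
      have : xs.countP (fun d => decide (pvPairA d c)) = 0 := by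
        apply List.countP_eq_zero.2
        intro d _
        simp [pvPairA, h]
      rw [this]
      rfl

-- ===== VERDICT (by name: the statement is the Claim_ definition above) =====
theorem count_vd_pairs_spec : Claim_equal_count_vd_pairs := by
  intro cycles _
  unfold Spec_count_vd_pairs
  rw [pvA_eq_pc, pvPC_eq_B, pvAlt_eq_foldl]
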